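-- pv_equiv track=rewrite | github.com/joyce0917/Fundamentals-of-Programming | 2_2.py | myX
-- ===== SOURCE A (Python) =====
-- def myX(n):
--     result=""
--     for i in range (-n,n+1):
--         m=-n
--         for j in range (2*n+1):
--             if abs(i)==abs(m):
--                 result+=("*")
--             else:
--                 result+=(" ")
--             m+=1
--         result+="\n"
--     return result[:-1]
-- ===== SOURCE B (Python) =====
-- def myX(n):
--     width = 2 * n + 1
--     rows = []
--     for i in range(-n, n + 1):
--         row = [" "] * width
--         row[n - abs(i)] = "*"
--         row[n + abs(i)] = "*"
--         rows.append("".join(row))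
--     return "\n".join(rows)
-- ===== Notes on version B (the rewrite author's own statement) =====
-- stated objective: simpler
-- what changed: Instead of scanning every cell of the grid with an inner column loop and an abs(i)==abs(m) test, B builds each row as a list of spaces and writes the two star positions n-abs(i) and n+abs(i) directly, then joins the rows with newlines (no trailing-newline trimming needed).
import Mathlib
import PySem

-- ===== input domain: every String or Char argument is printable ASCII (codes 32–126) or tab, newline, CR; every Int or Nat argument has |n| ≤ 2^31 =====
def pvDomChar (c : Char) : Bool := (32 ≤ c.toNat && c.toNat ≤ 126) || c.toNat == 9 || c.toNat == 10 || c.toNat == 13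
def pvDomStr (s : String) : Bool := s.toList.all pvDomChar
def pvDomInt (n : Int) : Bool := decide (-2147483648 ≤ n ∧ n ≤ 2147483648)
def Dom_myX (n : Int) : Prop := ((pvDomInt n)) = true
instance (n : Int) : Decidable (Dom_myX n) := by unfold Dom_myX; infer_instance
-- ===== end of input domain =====

-- B builds each row by writing the two star positions directly into a list of spaces and joins
-- the rows with newlines, instead of A's inner per-cell loop with an abs test and trailing-newline trim.

-- ===== PORT A =====
-- A builds one big string char by char; ported on List Char (String '+' is opaque to the kernel),
-- wrapped back with String.mk at the end; result[:-1] is PySem.List.slice … (some (-1)).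
def myX (n : Int) : String :=
  let result : List Char :=
    (PySem.List.pyRange (-n) (n + 1) 1).foldl (fun result i =>
      let st :=
        (PySem.List.pyRange 0 (2 * n + 1) 1).foldl
          (fun (st : List Char × Int) _j =>
            (if i.natAbs == st.2.natAbs then st.1 ++ ['*'] else st.1 ++ [' '], st.2 + 1))
          (result, -n)
      st.1 ++ ['\n']) []
  String.mk (PySem.List.slice result none (some (-1)))

-- ===== PORT B =====
-- row[k] = "*" uses .toNat on the index: both indices n-|i| and n+|i| are nonnegative for i in range(-n, n+1).
def myX_alt (n : Int) : String :=
  let rows : List (List Char) :=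
    (PySem.List.pyRange (-n) (n + 1) 1).map (fun i =>
      let row := List.replicate (2 * n + 1).toNat ' '
      let row := row.set (n - (i.natAbs : Int)).toNat '*'
      let row := row.set (n + (i.natAbs : Int)).toNat '*'
      row)
  String.mk (List.intercalate ['\n'] rows)

-- ===== PRECONDITION & SPEC =====
def Spec_myX (n : Int) (out : String) : Prop := out = myX_alt n
instance (n : Int) (out : String) : Decidable (Spec_myX n out) := by unfold Spec_myX; infer_instance

-- ===== CLAIM (what is proved, stated in full; the proofs are below) =====
def Claim_equal_myX : Prop := ∀ (n : Int), Dom_myX n → Spec_myX n (myX n)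

-- ===== LEMMAS AND PROOFS =====

-- the row segment A's inner loop produces, starting at column counter m, for L cells
def rowSeg (i m : Int) (L : Nat) : List Char :=
  (List.range L).map (fun (k : Nat) => if i.natAbs == (m + (k : Int)).natAbs then '*' else ' ')

theorem rowSeg_succ (i m : Int) (L : Nat) :
    rowSeg i m (L + 1) = (if i.natAbs == m.natAbs then '*' else ' ') :: rowSeg i (m + 1) L := by
  unfold rowSeg
  rw [List.range_succ_eq_map, List.map_cons, List.map_map]
  refine congrArg₂ List.cons (by norm_num) ?_
  apply List.map_congr_left
  intro k _
  have h : m + ((k : Int) + 1) = m + 1 + (k : Int) := by ring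
  simp only [Function.comp_apply, Nat.cast_succ, h]

-- A's inner loop: the counting fold appends exactly rowSeg and advances the counter by the length.
theorem innerA_fold (i : Int) (l : List Int) (acc : List Char) (m : Int) :
    l.foldl (fun (st : List Char × Int) _ =>
        (if i.natAbs == st.2.natAbs then st.1 ++ ['*'] else st.1 ++ [' '], st.2 + 1)) (acc, m)
      = (acc ++ rowSeg i m l.length, m + l.length) := by
  induction l generalizing acc m with
  | nil => simp [rowSeg]
  | cons x t ih =>
    simp only [List.foldl_cons, ih, List.length_cons]
    have h : rowSeg i m (t.length + 1)
        = (if i.natAbs == m.natAbs then '*' else ' ') :: rowSeg i (m + 1) t.length :=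
      rowSeg_succ i m t.length
    rw [h]
    simp only [Prod.mk.injEq]
    constructor
    · split <;> simp
    · push_cast; ring

-- B's row equals A's row for every i produced by the outer range.
theorem row_eq (n i : Int) (h1 : -n ≤ i) (h2 : i < n + 1) :
    (((List.replicate (2 * n + 1).toNat ' ').set (n - (i.natAbs : Int)).toNat '*').set
        (n + (i.natAbs : Int)).toNat '*') = rowSeg i (-n) (2 * n + 1).toNat := by
  have hn : 0 ≤ n := by omega
  have ha : (i.natAbs : Int) ≤ n := by omega
  apply List.ext_getElem
  · simp [rowSeg]
  · intro k hk _
    have hkl : k < (2 * n + 1).toNat := by simpa using hk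
    rw [List.getElem_set, List.getElem_set]
    unfold rowSeg
    rw [List.getElem_map, List.getElem_replicate, List.getElem_range]
    have e3 : (i.natAbs == (-n + (k : Int)).natAbs) = true ↔
        ((n + (i.natAbs : Int)).toNat = k ∨ (n - (i.natAbs : Int)).toNat = k) := by
      rw [beq_iff_eq]; omega
    clear hk
    simp only [e3]
    split_ifs with hA hB hC <;> first | rfl | omega

-- Joining rows, each with a trailing '\n', and dropping the last char = intercalating '\n'.
theorem flat_dropLast (rs : List (List Char)) :
    ((rs.map (fun r => r ++ ['\n'])).flatten).dropLast = List.intercalate ['\n'] rs := by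
  induction rs with
  | nil => simp [List.intercalate]
  | cons r t ih =>
    cases t with
    | nil => simp [List.intercalate]
    | cons s u =>
      have hne : ((List.map (fun r => r ++ ['\n']) (s :: u)).flatten) ≠ [] := by
        simp
      calc ((List.map (fun r => r ++ ['\n']) (r :: s :: u)).flatten).dropLast
          = ((r ++ ['\n']) ++ (List.map (fun r => r ++ ['\n']) (s :: u)).flatten).dropLast := by
            simp
        _ = (r ++ ['\n']) ++ ((List.map (fun r => r ++ ['\n']) (s :: u)).flatten).dropLast :=
            List.dropLast_append_of_ne_nil hne
        _ = r ++ ['\n'] ++ List.intercalate ['\n'] (s :: u) := by rw [ih]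
        _ = List.intercalate ['\n'] (r :: s :: u) := by
            simp [List.intercalate, List.intersperse, List.append_assoc]

-- ===== VERDICT (by name: the statement is the Claim_ definition above) =====
theorem myX_spec : Claim_equal_myX := by
  intro n _
  unfold Spec_myX myX myX_alt
  simp only []
  -- rewrite A's outer loop as an append-fold of whole rows
  have hout : (PySem.List.pyRange (-n) (n + 1) 1).foldl (fun result i =>
      let st :=
        (PySem.List.pyRange 0 (2 * n + 1) 1).foldl
          (fun (st : List Char × Int) _j =>
            (if i.natAbs == st.2.natAbs then st.1 ++ ['*'] else st.1 ++ [' '], st.2 + 1))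
          (result, -n)
      st.1 ++ ['\n']) []
      = [] ++ (PySem.List.pyRange (-n) (n + 1) 1).flatMap
          (fun i => rowSeg i (-n) (PySem.List.pyRange 0 (2 * n + 1) 1).length ++ ['\n']) := by
    rw [PySem.List.foldl_congr_mem _ _
      (fun acc i => acc ++ (rowSeg i (-n) (PySem.List.pyRange 0 (2 * n + 1) 1).length ++ ['\n'])) _
      (by intro acc i _; simp only [innerA_fold, List.append_assoc])]
    exact PySem.List.foldl_append_eq_flatMap _ _ _
  rw [hout]
  rw [List.nil_append, List.flatMap_def, PySem.List.slice_to_neg_one]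
  have hff := flat_dropLast ((PySem.List.pyRange (-n) (n + 1) 1).map
      (fun i => rowSeg i (-n) (PySem.List.pyRange 0 (2 * n + 1) 1).length))
  rw [List.map_map] at hff
  rw [show ((fun r => r ++ ['\n']) ∘ fun i =>
        rowSeg i (-n) (PySem.List.pyRange 0 (2 * n + 1) 1).length)
      = (fun i => rowSeg i (-n) (PySem.List.pyRange 0 (2 * n + 1) 1).length ++ ['\n'])
    from rfl] at hff
  rw [hff]
  congr 1
  refine congrArg _ ?_
  apply List.map_congr_left
  intro i hi
  rw [PySem.List.mem_pyRange_one] at hi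
  have hlen : (PySem.List.pyRange 0 (2 * n + 1) 1).length = (2 * n + 1).toNat := by
    have : (2 * n + 1) = ((2 * n + 1).toNat : Int) := by omega
    rw [this, PySem.List.pyRange_zero_natCast]
    simp
    omega
  rw [hlen, ← row_eq n i hi.1 hi.2]
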